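-- pv_equiv track=rewrite | github.com/danuaemx/oeis_repo | factor_ge_n_factor/count_le_n.py | T_of
-- ===== SOURCE A (Python) =====
-- import math
-- from functools import lru_cache
--
-- def find_multiset(n, k, factors):
--     """
--     Try to find exactly k factors (all ≥ k) whose product is n.
--     Returns one valid list of factors if possible, else None.
--     """
--     @lru_cache(None)
--     def helper(remaining, depth):
--         # If we've picked k factors, remaining must be 1
--         if depth == k:
--             return [] if remaining == 1 else None
--         # Prune: smallest possible product of the rest is k^(k-depth)
--         if remaining < k ** (k - depth):
--             return None
--         for a in factors.get(remaining, []):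
--             if a < k:
--                 continue
--             if remaining % a != 0:
--                 continue
--             rest = helper(remaining // a, depth + 1)
--             if rest is not None:
--                 return [a] + rest
--         return None
--
--     return helper(n, 0)
--
-- def T_of(n, factors):
--     """
--     Return T(n), the maximum k for which there exists a multiset of k factors ≥ k whose product is n.
--     """
--     if n <= 1:
--         return 1
--     max_k = int(math.log(n, 2)) + 1
--     for k in range(max_k, 1, -1):
--         if n < k ** k:
--             continue
--         if find_multiset(n, k, factors):
--             return k
--     return 1
-- ===== SOURCE B (Python) =====
-- def _feasible(r, j, k, factors):
--     """True iff r is a product of exactly j factors, each >= k,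
--     each drawn from factors.get(current remainder, [])."""
--     if j == 0:
--         return r == 1
--     return any(_feasible(r // a, j - 1, k, factors)
--                for a in factors.get(r, [])
--                if a >= k and r % a == 0)
--
-- def T_of(n, factors):
--     if n <= 1:
--         return 1
--     k = n.bit_length() - 1  # any k with k**k <= n satisfies 2**k <= n, i.e. k <= this
--     while k >= 2:
--         if k ** k <= n and _feasible(n, k, k, factors):
--             return k
--         k -= 1
--     return 1
-- ===== Notes on version B (the rewrite author's own statement) =====
-- stated objective: simpler
-- what changed: The lru_cache'd option-returning recursion that builds a factor list and prunes with k**(k-depth) is replaced by a plain boolean any()-recursion counting factors down (no cache, no prune, no list building), and the outer for-range loop with math.log becomes a decrementing while loop starting at n.bit_length()-1.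
import Mathlib
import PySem

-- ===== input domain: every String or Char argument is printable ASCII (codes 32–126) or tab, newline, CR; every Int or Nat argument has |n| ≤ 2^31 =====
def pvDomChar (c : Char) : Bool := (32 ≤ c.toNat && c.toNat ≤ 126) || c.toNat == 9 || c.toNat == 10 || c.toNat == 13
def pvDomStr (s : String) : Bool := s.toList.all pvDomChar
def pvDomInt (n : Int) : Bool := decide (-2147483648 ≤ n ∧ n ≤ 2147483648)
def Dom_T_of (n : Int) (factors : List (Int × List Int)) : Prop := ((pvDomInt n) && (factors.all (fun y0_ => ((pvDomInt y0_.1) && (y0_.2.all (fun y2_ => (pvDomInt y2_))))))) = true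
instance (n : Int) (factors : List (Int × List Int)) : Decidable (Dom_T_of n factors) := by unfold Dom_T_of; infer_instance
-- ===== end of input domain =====

-- B replaces A's cached option-returning, list-building, pruned recursion by a plain boolean
-- any()-recursion counting factors down, and A's for-range loop by a decrementing while loop.
-- (Return-value equivalence only; neither program mutates its arguments.)

-- ===== PORT A =====
-- factors.get(r, []) : first-match lookup in the association list (Python dict get)
def dictGetA (factors : List (Int × List Int)) (r : Int) : List Int :=
  (factors.lookup r).getD []

-- the 'for a in factors.get(remaining, [])' loop body of helper; h is the recursive call
-- helper(·, depth+1) (at one less remaining-factor count)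
def goA (k : Int) (h : Int → Option (List Int)) (r : Int) : List Int → Option (List Int)
  | [] => none
  | a :: as =>
    if a < k then goA k h r as
    else if PySem.Int.mod r a ≠ 0 then goA k h r as
    else match h (PySem.Int.floordiv r a) with
      | some rest => some (a :: rest)
      | none => goA k h r as

-- helper(remaining, depth), indexed by j = k - depth (the number of factors still to pick)
def helperA (k : Int) (factors : List (Int × List Int)) : Nat → Int → Option (List Int)
  | 0, r => if r = 1 then some [] else none
  | j+1, r =>
    if r < k ^ (j+1) then none
    else goA k (helperA k factors j) r (dictGetA factors r)

-- the 'for k in range(max_k, 1, -1)' loop; 'if find_multiset(n,k,factors):' is Python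
-- truthiness: a non-None, non-empty list
def loopA (n : Int) (factors : List (Int × List Int)) : List Int → Int
  | [] => 1
  | k :: ks =>
    if n < k ^ k.toNat then loopA n factors ks
    else match helperA k factors k.toNat n with
      | some rest => if rest.isEmpty then loopA n factors ks else k
      | none => loopA n factors ks

def T_of (n : Int) (factors : List (Int × List Int)) : Int :=
  if n ≤ 1 then 1
  else
    -- int(math.log(n, 2)) + 1, ported exactly as floor(log2 n) + 1 (for 2 ≤ n ≤ 2^31 the
    -- float expression equals floor(log2 n); checked around every power of two in range)
    let maxK : Int := (Nat.log2 n.toNat : Int) + 1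
    loopA n factors (PySem.List.pyRange maxK 1 (-1))

-- ===== PORT B =====
-- _feasible(r, j, k, factors): r is a product of exactly j factors, each ≥ k
def feasB (k : Int) (factors : List (Int × List Int)) : Nat → Int → Bool
  | 0, r => r == 1
  | j+1, r =>
    (dictGetA factors r).any fun a =>
      decide (a ≥ k) && (PySem.Int.mod r a == 0) && feasB k factors j (PySem.Int.floordiv r a)

-- the 'while k >= 2' loop, k decremented to k-1 each round
def whileB (n : Int) (factors : List (Int × List Int)) : Nat → Int
  | 0 => 1
  | 1 => 1
  | (k+2) =>
    let ki : Int := ((k+2 : Nat) : Int)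
    if decide (ki ^ (k+2) ≤ n) && feasB ki factors (k+2) n then ki
    else whileB n factors (k+1)

def T_of_alt (n : Int) (factors : List (Int × List Int)) : Int :=
  if n ≤ 1 then 1
  else whileB n factors (Nat.log2 n.toNat)  -- n.bit_length() - 1

-- ===== PRECONDITION & SPEC =====
def Spec_T_of (n : Int) (factors : List (Int × List Int)) (out : Int) : Prop := out = T_of_alt n factors
instance (n : Int) (factors : List (Int × List Int)) (out : Int) : Decidable (Spec_T_of n factors out) := by unfold Spec_T_of; infer_instance

-- ===== CLAIM (what is proved, stated in full; the proofs are below) =====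
def Claim_equal_T_of : Prop := ∀ (n : Int) (factors : List (Int × List Int)), Dom_T_of n factors → Spec_T_of n factors (T_of n factors)

-- ===== LEMMAS AND PROOFS =====

-- every successful helperA result has exactly j factors
theorem goA_length (k : Int) (j : Nat) (h : Int → Option (List Int))
    (hh : ∀ x l', h x = some l' → l'.length = j) (r : Int) :
    ∀ xs l, goA k h r xs = some l → l.length = j + 1 := by
  intro xs
  induction xs with
  | nil => intro l hl; simp [goA] at hl
  | cons a as ih =>
    intro l hl
    simp only [goA] at hl
    split_ifs at hl with h1 h2
    · exact ih l hl
    · exact ih l hl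
    · cases hrec : h (PySem.Int.floordiv r a) with
      | some rest =>
        rw [hrec] at hl
        simp only [Option.some.injEq] at hl
        subst hl
        simp [hh _ _ hrec]
      | none => rw [hrec] at hl; exact ih l hl

theorem helperA_length (k : Int) (factors : List (Int × List Int)) :
    ∀ (j : Nat) (r : Int) (l : List Int), helperA k factors j r = some l → l.length = j := by
  intro j
  induction j with
  | zero =>
    intro r l hl
    simp only [helperA] at hl
    split_ifs at hl; simp_all
  | succ j ih =>
    intro r l hl
    simp only [helperA] at hl
    split_ifs at hl
    exact goA_length k j _ (fun x l' => ih x l') r _ l hl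

-- a product of j dict-chained factors each ≥ k is at least k^j
theorem feasB_lower (k : Int) (hk : 1 ≤ k) (factors : List (Int × List Int)) :
    ∀ (j : Nat) (r : Int), feasB k factors j r = true → k ^ j ≤ r := by
  intro j
  induction j with
  | zero =>
    intro r hr
    simp [feasB] at hr
    simp [hr]
  | succ j ih =>
    intro r hr
    simp only [feasB, List.any_eq_true, Bool.and_eq_true, decide_eq_true_eq, beq_iff_eq] at hr
    obtain ⟨a, -, ⟨hak, hmod⟩, hfeas⟩ := hr
    have hq := ih _ hfeas
    have hr_eq : PySem.Int.floordiv r a * a + PySem.Int.mod r a = r :=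
      PySem.Int.floordiv_mul_add_mod r a
    rw [hmod, add_zero] at hr_eq
    have hkj : (0:Int) < k ^ j := pow_pos (by omega) j
    calc k ^ (j+1) = k ^ j * k := by ring
    _ ≤ PySem.Int.floordiv r a * a := by
        apply mul_le_mul hq (by omega) (by omega) (by omega)
    _ = r := hr_eq

-- the inner for-loop returns Some iff some listed candidate works
theorem goA_eq_any (k : Int) (j : Nat) (factors : List (Int × List Int)) (r : Int)
    (hrec : ∀ x, (helperA k factors j x).isSome = feasB k factors j x) :
    ∀ xs, (goA k (helperA k factors j) r xs).isSome =
      xs.any (fun a => decide (a ≥ k) && (PySem.Int.mod r a == 0) &&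
        feasB k factors j (PySem.Int.floordiv r a)) := by
  intro xs
  induction xs with
  | nil => simp [goA]
  | cons a as ih =>
    simp only [goA, List.any_cons]
    split_ifs with h1 h2
    · have hge : decide (a ≥ k) = false := by simp; omega
      simp [hge, ih]
    · have hmodF : (PySem.Int.mod r a == 0) = false := by simpa using h2
      simp [hmodF, ih]
    · have hmod0 : PySem.Int.mod r a = 0 := by push_neg at h2; exact h2
      have hge : decide (a ≥ k) = true := by simp; omega
      cases hcall : helperA k factors j (PySem.Int.floordiv r a) with
      | some rest =>
        have hsome := hrec (PySem.Int.floordiv r a)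
        rw [hcall] at hsome
        simp only [Option.isSome_some] at hsome
        simp [hge, hmod0, ← hsome]
      | none =>
        have hsome := hrec (PySem.Int.floordiv r a)
        rw [hcall] at hsome
        simp only [Option.isSome_none] at hsome
        simp [hge, hmod0, ← hsome, ih]

-- the pruned option-returning search succeeds exactly when the plain boolean search does
theorem helperA_isSome_eq_feasB (k : Int) (hk : 1 ≤ k) (factors : List (Int × List Int)) :
    ∀ (j : Nat) (r : Int), (helperA k factors j r).isSome = feasB k factors j r := by
  intro j
  induction j with
  | zero =>
    intro r
    simp only [helperA, feasB]
    split_ifs with h <;> simp [h]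
  | succ j ih =>
    intro r
    simp only [helperA]
    split_ifs with hprune
    · -- prune is sound: if r < k^(j+1) the boolean search also fails
      cases hfb : feasB k factors (j+1) r with
      | false => simp
      | true =>
        exfalso
        have := feasB_lower k hk factors (j+1) r hfb
        omega
    · rw [goA_eq_any k j factors r ih (dictGetA factors r)]
      simp only [feasB]

-- A's descending for-loop over [m, m-1, …, 2] equals B's while loop started at m
theorem loopA_eq_whileB (n : Int) (factors : List (Int × List Int)) :
    ∀ (m : Nat), loopA n factors (PySem.List.pyRange (m : Int) 1 (-1)) = whileB n factors m := by
  intro m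
  induction m with
  | zero =>
    rw [PySem.List.pyRange_neg_one_eq_nil (by omega)]
    simp [loopA, whileB]
  | succ m ih =>
    match m with
    | 0 =>
      rw [PySem.List.pyRange_neg_one_eq_nil (by omega)]
      simp [loopA, whileB]
    | m+1 =>
      have e : m + 1 + 1 = m + 2 := rfl
      simp only [e] at ih ⊢
      rw [PySem.List.pyRange_neg_one_cons (by push_cast; omega)]
      rw [show ((m+2 : Nat) : Int) - 1 = ((m+1 : Nat) : Int) by push_cast; ring]
      simp only [loopA, whileB]
      rw [show ((m+2 : Nat) : Int).toNat = m+2 by omega]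
      by_cases hlt : n < ((m+2 : Nat) : Int) ^ (m+2)
      · rw [if_pos hlt]
        rw [decide_eq_false (by omega : ¬ (((m+2 : Nat) : Int) ^ (m+2) ≤ n))]
        simp only [Bool.false_and, Bool.false_eq_true, if_false]
        exact ih
      · rw [if_neg hlt]
        have heq := helperA_isSome_eq_feasB ((m+2 : Nat) : Int) (by push_cast; omega)
          factors (m+2) n
        cases hh : helperA ((m+2 : Nat) : Int) factors (m+2) n with
        | some rest =>
          rw [hh] at heq
          simp only [Option.isSome_some] at heq
          have hlen := helperA_length ((m+2 : Nat) : Int) factors (m+2) n rest hh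
          have hne : rest.isEmpty = false := by
            cases rest with
            | nil => simp at hlen
            | cons x xs => simp
          rw [decide_eq_true (by omega : ((m+2 : Nat) : Int) ^ (m+2) ≤ n), ← heq]
          simp [hne]
        | none =>
          rw [hh] at heq
          simp only [Option.isSome_none] at heq
          rw [← heq]
          simpa using ih

-- the extra first iteration k = log2 n + 1 of A's loop is always skipped: n < k^k there
theorem T_of_eq_alt (n : Int) (factors : List (Int × List Int)) :
    T_of n factors = T_of_alt n factors := by
  unfold T_of T_of_alt
  split_ifs with h1
  · rfl
  · have hn2 : 2 ≤ n := by omega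
    have hL1 : 1 ≤ Nat.log2 n.toNat := by
      have h2 : 2 ≤ n.toNat := by omega
      exact (Nat.le_log2 (by omega)).mpr (by simpa using h2)
    show loopA n factors
        (PySem.List.pyRange ((Nat.log2 n.toNat : Int) + 1) 1 (-1)) =
      whileB n factors (Nat.log2 n.toNat)
    have hlt2 : n.toNat < 2 ^ (Nat.log2 n.toNat + 1) := Nat.lt_log2_self
    generalize hLg : Nat.log2 n.toNat = L at hlt2 hL1 ⊢
    rw [show (L : Int) + 1 = ((L + 1 : Nat) : Int) by push_cast; ring]
    rw [PySem.List.pyRange_neg_one_cons (by push_cast; omega)]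
    rw [show ((L+1 : Nat) : Int) - 1 = (L : Int) by push_cast; ring]
    simp only [loopA]
    rw [show ((L+1 : Nat) : Int).toNat = L+1 by omega]
    have hskip : n < ((L+1 : Nat) : Int) ^ (L+1) := by
      have hmono : (2:Nat) ^ (L+1) ≤ (L+1) ^ (L+1) := Nat.pow_le_pow_left (by omega) _
      have h3 : n.toNat < (L+1) ^ (L+1) := lt_of_lt_of_le hlt2 hmono
      have hc2 : ((((L+1) ^ (L+1) : Nat)) : Int) = ((L+1 : Nat) : Int) ^ (L+1) := by
        push_cast; ring
      omega
    rw [if_pos hskip]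
    exact loopA_eq_whileB n factors L

-- ===== VERDICT (by name: the statement is the Claim_ definition above) =====
theorem T_of_spec : Claim_equal_T_of := by
  intro n factors _
  unfold Spec_T_of
  exact T_of_eq_alt n factors
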